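-- pv_equiv track=rewrite | github.com/mwdavisii/dnd | dnd/dm/agent.py | _truncate_after_follow_up
-- ===== SOURCE A (Python) =====
-- def _truncate_after_follow_up(text: str) -> str:
--     markers = [
--         "\nAssistant\n",
--         "\nWhat do you do next?\nOutcome:",
--         "\nWhat action do you take?\nOutcome:",
--         "\nOutcome:",
--     ]
--     end = len(text)
--     for marker in markers:
--         position = text.find(marker)
--         if position != -1:
--             end = min(end, position)
--     return text[:end].strip()
-- ===== SOURCE B (Python) =====
-- def _truncate_after_follow_up(text: str) -> str:
--     markers = (
--         "\nAssistant\n",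
--         "\nWhat do you do next?\nOutcome:",
--         "\nWhat action do you take?\nOutcome:",
--         "\nOutcome:",
--     )
--     end = len(text)
--     for i in range(len(text)):
--         if text.startswith(markers, i):
--             end = i
--             break
--     return text[:end].strip()
-- ===== Notes on version B (the rewrite author's own statement) =====
-- stated objective: alternative
-- what changed: Replaces the four independent text.find scans (one full pass per marker, tracking a running min) with a single left-to-right scan over positions that stops at the first index where text.startswith(any marker, i), i.e. the leftmost match of the marker alternation.
import Mathlib
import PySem

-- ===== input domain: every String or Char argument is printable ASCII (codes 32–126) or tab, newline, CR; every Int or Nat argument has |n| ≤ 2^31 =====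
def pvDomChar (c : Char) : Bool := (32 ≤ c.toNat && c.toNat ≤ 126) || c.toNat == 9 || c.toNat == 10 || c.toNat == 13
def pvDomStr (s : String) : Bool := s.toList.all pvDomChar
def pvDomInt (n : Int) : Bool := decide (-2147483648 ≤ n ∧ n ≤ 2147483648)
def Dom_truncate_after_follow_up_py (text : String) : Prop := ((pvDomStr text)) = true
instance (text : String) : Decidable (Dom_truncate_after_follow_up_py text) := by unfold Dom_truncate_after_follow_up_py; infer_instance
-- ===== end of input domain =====

-- B replaces four separate find scans by a single left-to-right scan stopping at the
-- first position where any marker starts (alternative decomposition, same cost class).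


-- ===== PORT A =====
-- literal port of A: for each marker, text.find, keep the minimum position; then text[:end].strip()
def truncate_after_follow_up_py (text : String) : String :=
  let markers : List String :=
    ["\nAssistant\n",
     "\nWhat do you do next?\nOutcome:",
     "\nWhat action do you take?\nOutcome:",
     "\nOutcome:"]
  let endPos : Int := markers.foldl (fun e marker =>
      let position := PySem.Str.find text marker
      if position ≠ -1 then min e position else e) (PySem.Str.len text : Int)
  PySem.Str.strip (PySem.Str.slice text none (some endPos))

-- ===== PORT B =====
-- B's scan: walk the positions left to right, stop at the first where some marker is a prefix
def pvScanAlt (markers : List (List Char)) : List Char → Option Nat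
  | [] => none
  | c :: rest =>
    if markers.any (fun m => m.isPrefixOf (c :: rest)) then some 0
    else (pvScanAlt markers rest).map (· + 1)

def truncate_after_follow_up_py_alt (text : String) : String :=
  let markers : List (List Char) :=
    ["\nAssistant\n".toList,
     "\nWhat do you do next?\nOutcome:".toList,
     "\nWhat action do you take?\nOutcome:".toList,
     "\nOutcome:".toList]
  let cs := text.toList
  let endPos : Nat := (pvScanAlt markers cs).getD cs.length
  PySem.Str.strip (String.ofList (cs.take endPos))

-- ===== PRECONDITION & SPEC =====
def Spec_truncate_after_follow_up_py (text : String) (out : String) : Prop := out = truncate_after_follow_up_py_alt text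
instance (text : String) (out : String) : Decidable (Spec_truncate_after_follow_up_py text out) := by unfold Spec_truncate_after_follow_up_py; infer_instance

-- ===== CLAIM (what is proved, stated in full; the proofs are below) =====
def Claim_equal_truncate_after_follow_up_py : Prop := ∀ (text : String), Dom_truncate_after_follow_up_py text → Spec_truncate_after_follow_up_py text (truncate_after_follow_up_py text)

-- ===== LEMMAS AND PROOFS =====

-- "some marker of ms occurs at position i of cs"
def pvHit (ms : List (List Char)) (cs : List Char) (i : Nat) : Prop :=
  ∃ m ∈ ms, m <+: cs.drop i

-- the common characterisation both end positions satisfy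
def pvLeast (ms : List (List Char)) (cs : List Char) (x : Nat) : Prop :=
  x ≤ cs.length ∧ (∀ i < x, ¬ pvHit ms cs i) ∧ (x = cs.length ∨ pvHit ms cs x)

theorem pvLeast_unique (ms : List (List Char)) (cs : List Char) (x y : Nat)
    (hx : pvLeast ms cs x) (hy : pvLeast ms cs y) : x = y := by
  obtain ⟨hx1, hx2, hx3⟩ := hx
  obtain ⟨hy1, hy2, hy3⟩ := hy
  by_contra hne
  rcases Nat.lt_or_ge x y with h | h
  · rcases hx3 with h3 | h3
    · omega
    · exact hy2 x h h3
  · rcases hy3 with h3 | h3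
    · omega
    · exact hx2 y (by omega) h3

-- find = -1 means: no occurrence at any position
theorem pv_find_none (cs m : List Char) (h : PySem.Chars.find cs m = -1) (i : Nat) :
    ¬ m <+: cs.drop i := by
  intro hp
  have : ∃ j, m <+: cs.drop j := ⟨i, hp⟩
  have hin := (PySem.Chars.exists_prefix_drop_iff_isIn (s := cs) (sub := m)).mp this
  have := (PySem.Chars.isIn_iff_infix (sub := m) (s := cs)).mp hin
  exact (PySem.Chars.find_eq_neg_one_iff (s := cs) (sub := m)).mp h this

-- the A-side fold computes a pvLeast-style bound for the processed markers
theorem pvFoldA_spec (cs : List Char) (ms : List (List Char)) :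
    ∀ e : Int, 0 ≤ e →
    let r := ms.foldl (fun e marker =>
      let position := PySem.Chars.find cs marker
      if position ≠ -1 then min e position else e) e
    0 ≤ r ∧ r ≤ e ∧ (∀ i : Nat, (i : Int) < r → ∀ m ∈ ms, ¬ m <+: cs.drop i) ∧
      (r = e ∨ ∃ m ∈ ms, m <+: cs.drop r.toNat) := by
  induction ms with
  | nil => intro e he; exact ⟨he, le_refl _, by simp, Or.inl rfl⟩
  | cons m ms ih =>
    intro e he
    simp only [List.foldl_cons]
    set p := PySem.Chars.find cs m with hp
    by_cases hneg : p = -1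
    · -- marker absent: accumulator unchanged
      simp only [hneg]
      have h := ih e he
      refine ⟨h.1, h.2.1, ?_, ?_⟩
      · intro i hi m' hm'
        rcases List.mem_cons.mp hm' with rfl | hm'
        · exact pv_find_none cs m' (hp ▸ hneg)  i
        · exact h.2.2.1 i hi m' hm'
      · rcases h.2.2.2 with h' | ⟨m', hm', hpre⟩
        · exact Or.inl h'
        · exact Or.inr ⟨m', List.mem_cons_of_mem _ hm', hpre⟩
    · -- marker present at first position p ≥ 0
      have hp0 : 0 ≤ p := by
        have := PySem.Chars.neg_one_le_find (s := cs) (sub := m)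
        rw [← hp] at this; omega
      have hspec := PySem.Chars.find_spec (s := cs) (sub := m) (by rw [← hp]; exact hp0)
      simp only [hneg, if_pos, ne_eq, not_false_eq_true]
      have h := ih (min e p) (le_min he hp0)
      refine ⟨h.1, le_trans h.2.1 (min_le_left _ _), ?_, ?_⟩
      · intro i hi m' hm'
        rcases List.mem_cons.mp hm' with rfl | hm'
        · have hip : (i : Int) < p := lt_of_lt_of_le (lt_of_lt_of_le hi h.2.1) (min_le_right _ _)
          have : i < p.toNat := by omega
          rw [hp] at this
          exact hspec.2 i this
        · exact h.2.2.1 i hi m' hm'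
      · rcases h.2.2.2 with h' | ⟨m', hm', hpre⟩
        · by_cases hep : e ≤ p
          · exact Or.inl (by rw [h', min_eq_left hep])
          · refine Or.inr ⟨m, List.mem_cons_self, ?_⟩
            rw [h', min_eq_right (by omega : p ≤ e)]
            rw [hp]
            exact hspec.1
        · exact Or.inr ⟨m', List.mem_cons_of_mem _ hm', hpre⟩

-- B's scan returning none means: no marker occurs anywhere
theorem pvScanAlt_none (ms : List (List Char)) (hne : ∀ m ∈ ms, m ≠ []) :
    ∀ cs : List Char, pvScanAlt ms cs = none → ∀ i, ¬ pvHit ms cs i := by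
  intro cs
  induction cs with
  | nil =>
    intro _ i ⟨m, hm, hpre⟩
    rw [List.drop_nil] at hpre
    exact hne m hm (List.prefix_nil.mp hpre)
  | cons c rest ih =>
    intro h i ⟨m, hm, hpre⟩
    rw [pvScanAlt] at h
    split at h
    · exact Option.some_ne_none _ h
    · rename_i hany
      have hrec : pvScanAlt ms rest = none := by
        cases hh : pvScanAlt ms rest with
        | none => rfl
        | some k => rw [hh] at h; simp at h
      cases i with
      | zero =>
        exact hany (List.any_eq_true.mpr ⟨m, hm, List.isPrefixOf_iff_prefix.mpr (by simpa using hpre)⟩)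
      | succ j =>
        exact ih hrec j ⟨m, hm, by simpa using hpre⟩

-- B's scan returning some j means: j is the first hit, and j ≤ length
theorem pvScanAlt_some (ms : List (List Char)) :
    ∀ (cs : List Char) (j : Nat), pvScanAlt ms cs = some j →
      pvHit ms cs j ∧ (∀ i < j, ¬ pvHit ms cs i) ∧ j ≤ cs.length := by
  intro cs
  induction cs with
  | nil => intro j h; simp [pvScanAlt] at h
  | cons c rest ih =>
    intro j h
    rw [pvScanAlt] at h
    split at h
    · rename_i hany
      obtain rfl : j = 0 := (Option.some_inj.mp h).symm
      obtain ⟨m, hm, hpre⟩ := List.any_eq_true.mp hany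
      refine ⟨⟨m, hm, by simpa using List.isPrefixOf_iff_prefix.mp hpre⟩, by omega, by omega⟩
    · rename_i hany
      cases hh : pvScanAlt ms rest with
      | none => rw [hh] at h; simp at h
      | some k =>
        rw [hh] at h
        obtain rfl : j = k + 1 := by simpa using (Option.some_inj.mp h).symm
        obtain ⟨hhit, hfirst, hlen⟩ := ih k hh
        refine ⟨?_, ?_, by simpa using Nat.succ_le_succ hlen⟩
        · obtain ⟨m, hm, hpre⟩ := hhit
          exact ⟨m, hm, by simpa using hpre⟩
        · intro i hi ⟨m, hm, hpre⟩
          cases i with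
          | zero =>
            exact hany (List.any_eq_true.mpr ⟨m, hm, List.isPrefixOf_iff_prefix.mpr (by simpa using hpre)⟩)
          | succ i' =>
            exact hfirst i' (by omega) ⟨m, hm, by simpa using hpre⟩

-- the concrete marker lists
def pvMarkers : List (List Char) :=
  ["\nAssistant\n".toList,
   "\nWhat do you do next?\nOutcome:".toList,
   "\nWhat action do you take?\nOutcome:".toList,
   "\nOutcome:".toList]

theorem pvMarkers_ne : ∀ m ∈ pvMarkers, m ≠ [] := by decide

-- ===== VERDICT (by name: the statement is the Claim_ definition above) =====
theorem truncate_after_follow_up_py_spec : Claim_equal_truncate_after_follow_up_py := by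
  intro text _
  unfold Spec_truncate_after_follow_up_py truncate_after_follow_up_py truncate_after_follow_up_py_alt
  have hlen0 : (0:Int) ≤ (text.toList.length : Int) := by positivity
  obtain ⟨h0, hle, hfirst, hlast⟩ := pvFoldA_spec text.toList pvMarkers ((text.toList.length : Nat) : Int) hlen0
  set rA : Int := pvMarkers.foldl (fun e marker =>
      let position := PySem.Chars.find text.toList marker
      if position ≠ -1 then min e position else e) ((text.toList.length : Nat) : Int) with hrA
  have hLA : pvLeast pvMarkers text.toList rA.toNat := by
    refine ⟨by omega, ?_, ?_⟩
    · rintro i hi ⟨m, hm, hp⟩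
      exact hfirst i (by omega) m hm hp
    · rcases hlast with h | h
      · exact Or.inl (by omega)
      · exact Or.inr h
  have hLB : pvLeast pvMarkers text.toList ((pvScanAlt pvMarkers text.toList).getD text.toList.length) := by
    cases hscan : pvScanAlt pvMarkers text.toList with
    | none =>
      have hnone := pvScanAlt_none pvMarkers pvMarkers_ne text.toList hscan
      exact ⟨by simp, fun i _ => hnone i, Or.inl (by simp)⟩
    | some j =>
      obtain ⟨hhit, hfirst', hlen⟩ := pvScanAlt_some pvMarkers text.toList j hscan
      exact ⟨by simpa using hlen, fun i hi => hfirst' i (by simpa using hi), Or.inr (by simpa using hhit)⟩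
  have heq : rA.toNat = (pvScanAlt pvMarkers text.toList).getD text.toList.length :=
    pvLeast_unique _ _ _ _ hLA hLB
  -- bridge A's string-level fold to the char-list fold rA
  have hfold : (["\nAssistant\n",
     "\nWhat do you do next?\nOutcome:",
     "\nWhat action do you take?\nOutcome:",
     "\nOutcome:"] : List String).foldl (fun e marker =>
      let position := PySem.Str.find text marker
      if position ≠ -1 then min e position else e) (PySem.Str.len text : Int) = rA := by
    simp [hrA, pvMarkers, List.foldl_cons, List.foldl_nil]
  apply String.toList_inj.mp
  simp only [hfold]
  simp only [PySem.Str.toList_strip]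
  congr 1
  rw [show (["\nAssistant\n".toList,
     "\nWhat do you do next?\nOutcome:".toList,
     "\nWhat action do you take?\nOutcome:".toList,
     "\nOutcome:".toList] : List (List Char)) = pvMarkers from rfl, ← heq]
  simp [PySem.List.slice_to _ h0]
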